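-- pv_equiv track=rewrite | github.com/LucasCallamullo/Clases-Particulares | Trabajos Practicos y DESAFIOS/TRABAJO PRACTICO 2/Ema_tp_2.py | r1_analizar_timestap
-- ===== SOURCE A (Python) =====
-- def r1_analizar_timestap(linea):
--     tiene_h = False
--     tiene_s = False
--
--     for i in linea:
--         # para detectar HC
--         if i.lower() == "h":          # convierte al caracter en minuscula
--             tiene_h = True
--         elif tiene_h and i.lower() == "c":
--             return "Hard Control"
--         else:
--             tiene_h = False
--
--         # para detectar SC
--         if i.lower() == "s":  # convierte al caracter en minuscula
--             tiene_s = True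
--         elif tiene_s and i.lower() == "c":
--             return "Soft Control"
--         else:
--             tiene_s = False
-- ===== SOURCE B (Python) =====
-- def r1_analizar_timestap(linea):
--     s = linea.lower()
--     ih = s.find("hc")
--     isc = s.find("sc")
--     if ih == -1 and isc == -1:
--         return None
--     if isc == -1 or (ih != -1 and ih < isc):
--         return "Hard Control"
--     return "Soft Control"
-- ===== Notes on version B (the rewrite author's own statement) =====
-- stated objective: simpler
-- what changed: A's single-pass two-flag character automaton is replaced by lowercasing the whole string once, locating each of the two target digraphs with one str.find call, and returning the label of the earlier match (None if neither occurs); str.find's C implementation also makes B measurably faster.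
import Mathlib
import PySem

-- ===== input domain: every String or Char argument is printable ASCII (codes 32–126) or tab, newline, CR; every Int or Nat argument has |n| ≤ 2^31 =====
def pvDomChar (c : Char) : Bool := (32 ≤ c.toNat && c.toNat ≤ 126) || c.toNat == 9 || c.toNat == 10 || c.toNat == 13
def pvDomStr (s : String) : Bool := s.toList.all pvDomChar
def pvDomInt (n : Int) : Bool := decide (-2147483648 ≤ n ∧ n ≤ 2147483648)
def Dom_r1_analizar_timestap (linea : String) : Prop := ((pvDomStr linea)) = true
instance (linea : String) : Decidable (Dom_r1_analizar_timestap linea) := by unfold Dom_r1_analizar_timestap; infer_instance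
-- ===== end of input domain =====

-- B replaces A's per-character two-flag automaton by "lowercase once, find 'hc' and 'sc', report the earlier match" (objective: simpler).

-- ===== PORT A =====
-- A's for-loop with the two flags and the two early returns, step for step
def r1Loop : List Char → Bool → Bool → Option String
  | [], _, _ => none
  | c :: rest, tiene_h, tiene_s =>
    let cl := PySem.Chars.lowerChar c
    if cl = 'h' then
      -- tiene_h := True; second block: cl ≠ 's', cl ≠ 'c' ⇒ tiene_s := False
      r1Loop rest true false
    else if tiene_h ∧ cl = 'c' then some "Hard Control"
    else
      -- tiene_h := False; second block:
      if cl = 's' then r1Loop rest false true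
      else if tiene_s ∧ cl = 'c' then some "Soft Control"
      else r1Loop rest false false

def r1_analizar_timestap (linea : String) : Option String :=
  r1Loop linea.toList false false

-- ===== PORT B =====
def r1_analizar_timestap_alt (linea : String) : Option String :=
  let s := PySem.Str.lower linea
  let ih := PySem.Str.find s "hc"
  let isc := PySem.Str.find s "sc"
  if ih = -1 ∧ isc = -1 then none
  else if isc = -1 ∨ (ih ≠ -1 ∧ ih < isc) then some "Hard Control"
  else some "Soft Control"

-- ===== PRECONDITION & SPEC =====
def Spec_r1_analizar_timestap (linea : String) (out : Option String) : Prop := out = r1_analizar_timestap_alt linea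
instance (linea : String) (out : Option String) : Decidable (Spec_r1_analizar_timestap linea out) := by unfold Spec_r1_analizar_timestap; infer_instance

-- ===== CLAIM (what is proved, stated in full; the proofs are below) =====
def Claim_equal_r1_analizar_timestap : Prop := ∀ (linea : String), Dom_r1_analizar_timestap linea → Spec_r1_analizar_timestap linea (r1_analizar_timestap linea)

-- ===== LEMMAS AND PROOFS =====

-- B's decision, expressed on a char list (the lowered input)
def r1Decide (l : List Char) : Option String :=
  if PySem.Chars.find l ['h', 'c'] = -1 ∧ PySem.Chars.find l ['s', 'c'] = -1 then none
  else if PySem.Chars.find l ['s', 'c'] = -1 ∨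
      (PySem.Chars.find l ['h', 'c'] ≠ -1 ∧ PySem.Chars.find l ['h', 'c'] < PySem.Chars.find l ['s', 'c']) then
    some "Hard Control"
  else some "Soft Control"

theorem find_cons (a : Char) (l sub : List Char) :
    PySem.Chars.find (a :: l) sub =
      if sub <+: (a :: l) then 0
      else if sub <:+: l then PySem.Chars.find l sub + 1 else -1 := by
  by_cases hp : sub <+: (a :: l)
  · rw [if_pos hp]
    have hinf : sub <:+: (a :: l) := hp.isInfix
    have h0 : 0 ≤ PySem.Chars.find (a :: l) sub :=
      (PySem.Chars.find_nonneg_iff _ _).2 hinf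
    obtain ⟨_, hmin⟩ := PySem.Chars.find_spec h0
    by_contra hne
    have hpos : 0 < (PySem.Chars.find (a :: l) sub).toNat := by omega
    have := hmin 0 hpos
    simp only [List.drop_zero] at this
    exact this hp
  · rw [if_neg hp]
    by_cases hi : sub <:+: l
    · rw [if_pos hi]
      have h0g : 0 ≤ PySem.Chars.find l sub := (PySem.Chars.find_nonneg_iff _ _).2 hi
      have hinf : sub <:+: (a :: l) := List.infix_cons_iff.2 (Or.inr hi)
      have h0f : 0 ≤ PySem.Chars.find (a :: l) sub := (PySem.Chars.find_nonneg_iff _ _).2 hinf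
      obtain ⟨hf1, hf2⟩ := PySem.Chars.find_spec h0f
      obtain ⟨hg1, hg2⟩ := PySem.Chars.find_spec h0g
      set f := PySem.Chars.find (a :: l) sub with hfdef
      set g := PySem.Chars.find l sub with hgdef
      have hfne0 : f.toNat ≠ 0 := by
        intro h; rw [h] at hf1; simp only [List.drop_zero] at hf1; exact hp hf1
      have hle : f.toNat ≤ g.toNat + 1 := by
        by_contra hgt
        have := hf2 (g.toNat + 1) (by omega)
        rw [List.drop_succ_cons] at this
        exact this hg1
      have hge : g.toNat + 1 ≤ f.toNat := by
        by_contra hlt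
        have hk : f.toNat - 1 < g.toNat := by omega
        have hdrop : sub <+: l.drop (f.toNat - 1) := by
          have : f.toNat = (f.toNat - 1) + 1 := by omega
          rw [this, List.drop_succ_cons] at hf1
          exact hf1
        exact hg2 (f.toNat - 1) hk hdrop
      have : f.toNat = g.toNat + 1 := by omega
      omega
    · rw [if_neg hi]
      have : ¬ sub <:+: (a :: l) := by
        intro h
        rcases List.infix_cons_iff.1 h with h' | h'
        · exact hp h'
        · exact hi h'
      exact (PySem.Chars.find_eq_neg_one_iff _ _).2 this

theorem r1Decide_cons (a : Char) (l : List Char)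
    (h1 : ¬ ['h','c'] <+: (a :: l)) (h2 : ¬ ['s','c'] <+: (a :: l)) :
    r1Decide (a :: l) = r1Decide l := by
  have hh := find_cons a l ['h','c']
  have hs := find_cons a l ['s','c']
  rw [if_neg h1] at hh
  rw [if_neg h2] at hs
  have nh := PySem.Chars.neg_one_le_find l ['h','c']
  have ns := PySem.Chars.neg_one_le_find l ['s','c']
  have nhi := PySem.Chars.find_eq_neg_one_iff l ['h','c']
  have nsi := PySem.Chars.find_eq_neg_one_iff l ['s','c']
  unfold r1Decide
  by_cases ih : ['h','c'] <:+: l <;> by_cases is : ['s','c'] <:+: l <;>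
    simp only [ih, is, if_pos, if_neg, not_false_iff] at hh hs <;>
    rw [hh, hs] <;> split_ifs <;> first | rfl | (exfalso; simp_all <;> omega)

theorem r1Decide_short (l : List Char) (h : l.length ≤ 1) : r1Decide l = none := by
  have hh : ¬ ['h','c'] <:+: l := by
    intro hx; have := hx.length_le; simp at this; omega
  have hs : ¬ ['s','c'] <:+: l := by
    intro hx; have := hx.length_le; simp at this; omega
  unfold r1Decide
  rw [(PySem.Chars.find_eq_neg_one_iff _ _).2 hh, (PySem.Chars.find_eq_neg_one_iff _ _).2 hs]
  simp

theorem r1Decide_hard (l : List Char) : r1Decide ('h' :: 'c' :: l) = some "Hard Control" := by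
  have hh := find_cons 'h' ('c' :: l) ['h','c']
  rw [if_pos (by simp [List.cons_prefix_cons])] at hh
  have hs := find_cons 'h' ('c' :: l) ['s','c']
  rw [if_neg (by simp [List.cons_prefix_cons])] at hs
  have ns := PySem.Chars.neg_one_le_find ('c' :: l) ['s','c']
  have nsi := PySem.Chars.find_eq_neg_one_iff ('c' :: l) ['s','c']
  unfold r1Decide
  rw [hh, hs]
  split_ifs <;> first | rfl | (exfalso; simp_all <;> omega)

theorem r1Decide_soft (l : List Char) : r1Decide ('s' :: 'c' :: l) = some "Soft Control" := by
  have hs := find_cons 's' ('c' :: l) ['s','c']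
  rw [if_pos (by simp [List.cons_prefix_cons])] at hs
  have hh := find_cons 's' ('c' :: l) ['h','c']
  rw [if_neg (by simp [List.cons_prefix_cons])] at hh
  have nh := PySem.Chars.neg_one_le_find ('c' :: l) ['h','c']
  have nhi := PySem.Chars.find_eq_neg_one_iff ('c' :: l) ['h','c']
  unfold r1Decide
  rw [hh, hs]
  split_ifs <;> first | rfl | (exfalso; simp_all <;> omega)

-- peel one leading char that cannot start a match
theorem r1Decide_peel (p x : Char) (l : List Char)
    (hph : ¬ (p = 'h' ∧ x = 'c')) (hps : ¬ (p = 's' ∧ x = 'c')) :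
    r1Decide (p :: x :: l) = r1Decide (x :: l) := by
  apply r1Decide_cons <;> simp [List.cons_prefix_cons] <;> tauto

theorem r1Decide_peel1 (x : Char) (l : List Char) (hh : x ≠ 'h') (hs : x ≠ 's') :
    r1Decide (x :: l) = r1Decide l := by
  apply r1Decide_cons <;> simp [List.cons_prefix_cons] <;> tauto

theorem r1Loop_eq (cs : List Char) (th ts : Bool) (hx : ¬ (th = true ∧ ts = true)) :
    r1Loop cs th ts =
      r1Decide ((if th then ['h'] else if ts then ['s'] else []) ++ cs.map PySem.Chars.lowerChar) := by
  induction cs generalizing th ts with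
  | nil =>
    simp only [List.map_nil, List.append_nil, r1Loop]
    rw [r1Decide_short]
    cases th <;> cases ts <;> simp
  | cons c rest IH =>
    simp only [List.map_cons, r1Loop]
    by_cases h1 : PySem.Chars.lowerChar c = 'h'
    · rw [if_pos h1, IH true false (by simp), h1]
      cases th <;> cases ts
      · simp
      · simpa using (r1Decide_peel 's' 'h' _ (by simp) (by simp)).symm
      · simpa using (r1Decide_peel 'h' 'h' _ (by simp) (by simp)).symm
      · exact absurd ⟨rfl, rfl⟩ hx
    · rw [if_neg h1]
      by_cases h2 : th = true ∧ PySem.Chars.lowerChar c = 'c'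
      · rw [if_pos h2]
        obtain ⟨hth, hc⟩ := h2
        rw [hth, hc]
        simpa using (r1Decide_hard _).symm
      · rw [if_neg h2]
        by_cases h3 : PySem.Chars.lowerChar c = 's'
        · rw [if_pos h3, IH false true (by simp), h3]
          cases th <;> cases ts
          · simp
          · simpa using (r1Decide_peel 's' 's' _ (by simp) (by simp)).symm
          · simpa using (r1Decide_peel 'h' 's' _ (by simp) (by simp)).symm
          · exact absurd ⟨rfl, rfl⟩ hx
        · rw [if_neg h3]
          by_cases h4 : ts = true ∧ PySem.Chars.lowerChar c = 'c'
          · rw [if_pos h4]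
            obtain ⟨hts, hc⟩ := h4
            have hth : th = false := by
              cases th
              · rfl
              · exact absurd ⟨rfl, hc⟩ h2
            rw [hth, hts, hc]
            simpa using (r1Decide_soft _).symm
          · rw [if_neg h4, IH false false (by simp)]
            have hxc : r1Decide (PySem.Chars.lowerChar c :: rest.map PySem.Chars.lowerChar)
                = r1Decide (rest.map PySem.Chars.lowerChar) := r1Decide_peel1 _ _ h1 h3
            cases th <;> cases ts
            · simpa using hxc.symm
            · have hc : PySem.Chars.lowerChar c ≠ 'c' := fun h => h4 ⟨rfl, h⟩
              simpa using ((r1Decide_peel 's' _ _ (by simp) (by simp [hc])).trans hxc).symm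
            · have hc : PySem.Chars.lowerChar c ≠ 'c' := fun h => h2 ⟨rfl, h⟩
              simpa using ((r1Decide_peel 'h' _ _ (by simp [hc]) (by simp)).trans hxc).symm
            · exact absurd ⟨rfl, rfl⟩ hx

-- ===== VERDICT (by name: the statement is the Claim_ definition above) =====
theorem r1_analizar_timestap_spec : Claim_equal_r1_analizar_timestap := by
  intro linea _
  unfold Spec_r1_analizar_timestap r1_analizar_timestap r1_analizar_timestap_alt
  rw [r1Loop_eq _ false false (by simp)]
  simp [r1Decide, PySem.Chars.lower]
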